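-- pv_equiv track=rewrite | github.com/xguerrerov0903/xguerrerov0903 | Matriz.py | numeros_claves
-- ===== SOURCE A (Python) =====
-- def numeros_claves (matriz):
--     lista_claves = []
--     for x in matriz:
--         num_clave = []
--         numero = 0
--         for y in x:
--             if y == 1:
--                 numero += 1
--             else:
--                 if numero > 0:
--                     num_clave.append(numero)
--                     numero = 0
--         if numero > 0:
--             num_clave.append(numero)
--         lista_claves.append(num_clave)
--     return lista_claves
-- ===== SOURCE B (Python) =====
-- from itertools import groupby
--
-- def numeros_claves(matriz):
--     return [[sum(1 for _ in g) for k, g in groupby(x) if k == 1] for x in matriz]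
-- ===== Notes on version B (the rewrite author's own statement) =====
-- stated objective: idiomatic
-- what changed: Replaced the explicit counter/reset state machine per row with itertools.groupby run-segmentation: group consecutive equal elements and emit the length of each run of 1s.
import Mathlib
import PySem

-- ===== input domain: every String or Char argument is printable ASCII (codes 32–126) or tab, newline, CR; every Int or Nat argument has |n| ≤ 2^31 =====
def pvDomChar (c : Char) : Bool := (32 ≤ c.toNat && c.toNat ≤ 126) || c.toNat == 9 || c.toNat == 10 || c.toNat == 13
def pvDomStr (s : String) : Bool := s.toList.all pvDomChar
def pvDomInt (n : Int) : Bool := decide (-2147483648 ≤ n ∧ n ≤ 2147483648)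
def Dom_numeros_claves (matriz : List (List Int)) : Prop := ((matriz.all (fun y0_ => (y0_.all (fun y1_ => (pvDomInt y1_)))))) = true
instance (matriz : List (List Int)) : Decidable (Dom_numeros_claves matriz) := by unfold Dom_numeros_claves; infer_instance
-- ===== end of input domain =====

-- B replaces A's per-row counter/reset state machine by groupby-style run segmentation (objective: idiomatic).

-- ===== PORT A =====
-- inner loop step: state = (num_clave, numero)
def pvStepA (st : List Int × Int) (y : Int) : List Int × Int :=
  if y = 1 then (st.1, st.2 + 1)
  else if st.2 > 0 then (st.1 ++ [st.2], 0) else st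

def numeros_claves (matriz : List (List Int)) : List (List Int) :=
  matriz.foldl (fun lista_claves x =>
    let r := x.foldl pvStepA ([], 0)
    lista_claves ++ [if r.2 > 0 then r.1 ++ [r.2] else r.1]) []

-- ===== PORT B =====
-- run segmentation, mirroring itertools.groupby: (key, run length) for each maximal run
def pvGroups : List Int → List (Int × Nat)
  | [] => []
  | x :: rest =>
    (x, 1 + (rest.takeWhile (· == x)).length) :: pvGroups (rest.dropWhile (· == x))
termination_by l => l.length
decreasing_by
  simpa using Nat.lt_succ_of_le (List.length_dropWhile_le _ _)

def numeros_claves_alt (matriz : List (List Int)) : List (List Int) :=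
  matriz.map (fun x =>
    (pvGroups x).filterMap (fun g => if g.1 = 1 then some (g.2 : Int) else none))

-- ===== PRECONDITION & SPEC =====
def Spec_numeros_claves (matriz : List (List Int)) (out : List (List Int)) : Prop := out = numeros_claves_alt matriz
instance (matriz : List (List Int)) (out : List (List Int)) : Decidable (Spec_numeros_claves matriz out) := by unfold Spec_numeros_claves; infer_instance

-- ===== CLAIM (what is proved, stated in full; the proofs are below) =====
def Claim_equal_numeros_claves : Prop := ∀ (matriz : List (List Int)), Dom_numeros_claves matriz → Spec_numeros_claves matriz (numeros_claves matriz)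

-- ===== LEMMAS AND PROOFS =====

-- common specification of one row's result, given the running counter n
def pvS : List Int → Int → List Int
  | [], n => if n > 0 then [n] else []
  | y :: ys, n => if y = 1 then pvS ys (n + 1) else if n > 0 then n :: pvS ys 0 else pvS ys 0

theorem pvA_inner (ys : List Int) : ∀ acc n, 0 ≤ n →
    (let r := ys.foldl pvStepA (acc, n)
     if r.2 > 0 then r.1 ++ [r.2] else r.1) = acc ++ pvS ys n := by
  induction ys with
  | nil => intro acc n _; simp only [List.foldl_nil, pvS]; split <;> simp
  | cons y ys ih =>
    intro acc n hn
    simp only [List.foldl_cons, pvS, pvStepA]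
    by_cases h1 : y = 1
    · simpa [h1] using ih acc (n + 1) (by omega)
    · by_cases h2 : n > 0
      · simpa [h1, h2] using ih (acc ++ [n]) 0 le_rfl
      · have hn0 : n = 0 := by omega
        subst hn0
        simpa [h1] using ih acc 0 le_rfl

theorem pvS_ones (t : List Int) (h : ∀ a ∈ t, a = 1) : ∀ ys n,
    pvS (t ++ ys) n = pvS ys (n + t.length) := by
  induction t with
  | nil => intro ys n; simp
  | cons a t ih =>
    intro ys n
    have ha : a = 1 := h a (by simp)
    have ht : ∀ b ∈ t, b = 1 := fun b hb => h b (by simp [hb])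
    subst ha
    rw [List.cons_append,
      show pvS (1 :: (t ++ ys)) n = pvS (t ++ ys) (n + 1) from by simp [pvS],
      ih ht,
      show n + 1 + (t.length : Int) = n + (((1:Int) :: t).length : Int) from by
        push_cast [List.length_cons]; ring]

theorem pvS_nonones (t : List Int) (h : ∀ a ∈ t, a ≠ 1) : ∀ ys,
    pvS (t ++ ys) 0 = pvS ys 0 := by
  induction t with
  | nil => intro ys; simp
  | cons a t ih =>
    intro ys
    have ha : a ≠ 1 := h a (by simp)
    have ht : ∀ b ∈ t, b ≠ 1 := fun b hb => h b (by simp [hb])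
    simp [pvS, ha, ih ht]

theorem pvS_flush (ys : List Int) (n : Int) (hn : 0 < n) (hy : ∀ y, ys.head? = some y → y ≠ 1) :
    pvS ys n = n :: pvS ys 0 := by
  cases ys with
  | nil => simp [pvS, hn]
  | cons y ys =>
    have : y ≠ 1 := hy y rfl
    simp [pvS, this, hn]

theorem pv_dropWhile_head (p : Int → Bool) (l : List Int) :
    ∀ y, (l.dropWhile p).head? = some y → p y = false := by
  induction l with
  | nil => simp
  | cons a l ih =>
    intro y hy
    rw [List.dropWhile_cons] at hy
    split at hy
    · exact ih y hy
    · next h =>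
      simp only [List.head?_cons, Option.some.injEq] at hy
      subst hy
      simpa using h

theorem pvB_row (ys : List Int) :
    (pvGroups ys).filterMap (fun g => if g.1 = 1 then some (g.2 : Int) else none) = pvS ys 0 := by
  induction ys using pvGroups.induct with
  | case1 => simp [pvGroups, pvS]
  | case2 x rest ih =>
    have hsplit : rest.takeWhile (· == x) ++ rest.dropWhile (· == x) = rest :=
      List.takeWhile_append_dropWhile
    have htake : ∀ a ∈ rest.takeWhile (· == x), a = x := by
      intro a ha
      simpa using List.mem_takeWhile_imp ha
    have hdrop : ∀ y, (rest.dropWhile (· == x)).head? = some y → y ≠ x := by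
      intro y hy
      have := pv_dropWhile_head (· == x) rest y hy
      simpa using this
    rw [pvGroups]
    by_cases h1 : x = 1
    · subst h1
      simp only [List.filterMap_cons, ih]
      have : pvS (1 :: rest) 0 = pvS (rest.takeWhile (· == (1:Int)) ++ rest.dropWhile (· == (1:Int))) 1 := by
        rw [hsplit]; simp [pvS]
      rw [this, pvS_ones _ htake,
        pvS_flush (rest.dropWhile (· == (1:Int)))
          (1 + ((rest.takeWhile (· == (1:Int))).length : Int)) (by omega)
          (fun y hy => by simpa using hdrop y hy)]
      push_cast
      ring_nf
    · simp only [List.filterMap_cons, if_neg h1, ih]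
      have : pvS (x :: rest) 0 = pvS (rest.takeWhile (· == x) ++ rest.dropWhile (· == x)) 0 := by
        rw [hsplit]; simp [pvS, h1]
      rw [this, pvS_nonones _ (fun a ha => by rw [htake a ha]; exact h1)]

theorem pv_outer (m : List (List Int)) : ∀ acc,
    m.foldl (fun lista_claves x =>
      let r := x.foldl pvStepA ([], 0)
      lista_claves ++ [if r.2 > 0 then r.1 ++ [r.2] else r.1]) acc
    = acc ++ m.map (fun x => pvS x 0) := by
  induction m with
  | nil => simp
  | cons x m ih =>
    intro acc
    simp only [List.foldl_cons, List.map_cons, ih]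
    rw [pvA_inner x [] 0 le_rfl]
    simp

-- ===== VERDICT (by name: the statement is the Claim_ definition above) =====
theorem numeros_claves_spec : Claim_equal_numeros_claves := by
  intro matriz _
  unfold Spec_numeros_claves numeros_claves numeros_claves_alt
  rw [pv_outer]
  simp [pvB_row]
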